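-- pv_equiv track=rewrite | github.com/laycom/educational_projects | habr/task_1.py | is_compatible
-- ===== SOURCE A (Python) =====
-- def is_compatible(unit1, unit2):
--     unit_classes = [
--         ('g', 'kg'),
--         ('ml', 'l'),
--         ('cnt', 'tens')
--     ]
--
--     for unit_class in unit_classes:
--         if unit1 in unit_class:
--             return unit2 in unit_class
--     return False
-- ===== SOURCE B (Python) =====
-- _UNITS = ('g', 'kg', 'ml', 'l', 'cnt', 'tens')
--
-- def is_compatible(unit1, unit2):
--     if unit1 not in _UNITS or unit2 not in _UNITS:
--         return False
--     return _UNITS.index(unit1) // 2 == _UNITS.index(unit2) // 2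
-- ===== Notes on version B (the rewrite author's own statement) =====
-- stated objective: alternative
-- what changed: Replaced the scan over class pairs (return unit2-in-pair for the first pair containing unit1) with a single flat unit tuple whose positions encode the classes: both units are looked up and their indices compared by integer division i//2 == j//2.
import Mathlib
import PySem

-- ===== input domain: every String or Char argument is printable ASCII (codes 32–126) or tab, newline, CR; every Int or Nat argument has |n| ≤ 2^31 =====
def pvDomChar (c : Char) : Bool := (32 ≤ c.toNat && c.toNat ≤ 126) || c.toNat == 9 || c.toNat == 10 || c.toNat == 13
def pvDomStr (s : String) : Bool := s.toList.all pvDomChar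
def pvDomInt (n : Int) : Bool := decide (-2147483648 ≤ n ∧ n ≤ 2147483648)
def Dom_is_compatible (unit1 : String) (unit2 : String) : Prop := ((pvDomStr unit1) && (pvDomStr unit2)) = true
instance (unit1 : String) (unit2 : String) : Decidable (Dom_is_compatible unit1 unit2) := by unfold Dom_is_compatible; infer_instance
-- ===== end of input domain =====

-- B replaces A's scan over class pairs with one flat unit tuple: positions i, j of the two
-- units are compared by i // 2 == j // 2, so the class grouping is arithmetic (objective: alternative).

-- ===== PORT A =====
-- the for-loop over unit_classes with early return, as structural recursion;
-- 'unit1 in unit_class' on a 2-tuple is equality with either component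
def pvALoop (unit1 unit2 : String) : List (String × String) → Bool
  | [] => false
  | c :: rest =>
      if unit1 = c.1 || unit1 = c.2 then unit2 = c.1 || unit2 = c.2
      else pvALoop unit1 unit2 rest

def is_compatible (unit1 : String) (unit2 : String) : Bool :=
  pvALoop unit1 unit2 [("g", "kg"), ("ml", "l"), ("cnt", "tens")]

-- ===== PORT B =====
def pvUnits : List String := ["g", "kg", "ml", "l", "cnt", "tens"]

def is_compatible_alt (unit1 : String) (unit2 : String) : Bool :=
  if !(pvUnits.contains unit1) || !(pvUnits.contains unit2) then false
  else
    match PySem.List.index? pvUnits unit1, PySem.List.index? pvUnits unit2 with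
    | some i, some j => PySem.Int.floordiv (i : Int) 2 == PySem.Int.floordiv (j : Int) 2
    | _, _ => false  -- unreachable: both units are members (Python .index cannot raise here)

-- ===== PRECONDITION & SPEC =====
def Spec_is_compatible (unit1 : String) (unit2 : String) (out : Bool) : Prop := out = is_compatible_alt unit1 unit2
instance (unit1 : String) (unit2 : String) (out : Bool) : Decidable (Spec_is_compatible unit1 unit2 out) := by unfold Spec_is_compatible; infer_instance

-- ===== CLAIM (what is proved, stated in full; the proofs are below) =====
def Claim_equal_is_compatible : Prop := ∀ (unit1 : String) (unit2 : String), Dom_is_compatible unit1 unit2 → Spec_is_compatible unit1 unit2 (is_compatible unit1 unit2)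

-- ===== LEMMAS AND PROOFS =====

-- ===== VERDICT (by name: the statement is the Claim_ definition above) =====
set_option maxHeartbeats 1000000 in
theorem is_compatible_spec : Claim_equal_is_compatible := by
  intro u1 u2 _
  unfold Spec_is_compatible
  simp only [is_compatible, is_compatible_alt, pvALoop, pvUnits,
    PySem.List.index?_eq_idxOf?, List.idxOf?, List.findIdx?, List.findIdx?.go,
    List.contains_cons, List.contains_nil]
  by_cases h1 : u1 = "g" <;> by_cases h2 : u1 = "kg" <;> by_cases h3 : u1 = "ml" <;>
    by_cases h4 : u1 = "l" <;> by_cases h5 : u1 = "cnt" <;> by_cases h6 : u1 = "tens" <;>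
  by_cases g1 : u2 = "g" <;> by_cases g2 : u2 = "kg" <;> by_cases g3 : u2 = "ml" <;>
    by_cases g4 : u2 = "l" <;> by_cases g5 : u2 = "cnt" <;> by_cases g6 : u2 = "tens" <;>
    simp_all
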